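-- pv_equiv track=rewrite | github.com/nju-websoft/ReadPyE | env_validation/template.py | _get_exception_stack
-- ===== SOURCE A (Python) =====
-- MAX_STACK_LENGTH = 100
--
-- def _get_exception_stack(content):
--     # Get the last exception stack from the proceding content
--     lines = content.split('\n')
--
--     length = min(len(lines), MAX_STACK_LENGTH)
--     stack_lines = []
--     for i in range(2, length+1):
--         # reverse
--         line = lines[-i].strip()
--         if line == 'Traceback (most recent call last):':
--             return stack_lines
--
--         stack_lines.append(line)
--
--     return []
-- ===== SOURCE B (Python) =====
-- MAX_STACK_LENGTH = 100
--
-- def _get_exception_stack(content):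
--     # Locate the rightmost traceback marker in the stripped tail window, then slice.
--     lines = content.split('\n')
--     window = [line.strip() for line in lines[-MAX_STACK_LENGTH:]]
--     last = len(window) - 1
--     for k in range(last - 1, -1, -1):
--         if window[k] == 'Traceback (most recent call last):':
--             return list(reversed(window[k + 1:last]))
--     return []
-- ===== Notes on version B (the rewrite author's own statement) =====
-- stated objective: alternative
-- what changed: A scans backwards accumulating stripped lines and early-returns the accumulator at the marker; B builds the stripped tail window once, searches for the rightmost marker index, and returns the reversed slice after it.
import Mathlib
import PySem

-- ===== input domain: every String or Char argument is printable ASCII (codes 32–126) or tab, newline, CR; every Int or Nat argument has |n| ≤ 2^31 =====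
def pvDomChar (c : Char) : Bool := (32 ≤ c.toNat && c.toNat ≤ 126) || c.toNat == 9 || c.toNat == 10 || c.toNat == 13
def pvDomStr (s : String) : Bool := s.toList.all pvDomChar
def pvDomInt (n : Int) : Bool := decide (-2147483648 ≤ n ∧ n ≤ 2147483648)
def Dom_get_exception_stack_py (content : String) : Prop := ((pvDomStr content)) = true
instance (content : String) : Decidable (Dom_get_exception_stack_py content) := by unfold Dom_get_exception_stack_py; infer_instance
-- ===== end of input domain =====

-- B replaces A's backward scan-and-accumulate-with-early-return by locate-the-rightmost-marker-then-slice-and-reverse (alternative decomposition, same cost).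

def pvMarker : String := "Traceback (most recent call last):"

-- ===== PORT A =====
-- A's for-loop with early return: recursion over the remaining range(2, length+1)
def pvGoA (lines : List String) (is : List Int) (acc : List String) : List String :=
  match is with
  | [] => []
  | i :: rest =>
    match PySem.List.pyGet? lines (-i) with
    | none => []  -- unreachable: 2 ≤ i ≤ min(len(lines),100), so lines[-i] never raises
    | some l =>
      let line := PySem.Str.strip l
      if line = pvMarker then acc
      else pvGoA lines rest (acc ++ [line])

def get_exception_stack_py (content : String) : List String :=
  let lines := (PySem.Str.split? content "\n").getD []  -- sep ≠ "", so split? is always some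
  let length : Int := min (PySem.List.len lines) 100
  pvGoA lines (PySem.List.pyRange 2 (length + 1) 1) []

-- ===== PORT B =====
-- B's for-loop over range(last-1, -1, -1) with early return: recursion over the remaining range
def pvGoB (window : List String) (ks : List Int) (last : Int) : List String :=
  match ks with
  | [] => []
  | k :: rest =>
    if PySem.List.pyGetD window k "" = pvMarker then
      (PySem.List.slice window (some (k + 1)) (some last)).reverse
    else pvGoB window rest last

def get_exception_stack_py_alt (content : String) : List String :=
  let lines := (PySem.Str.split? content "\n").getD []  -- sep ≠ "", so split? is always some
  let window := (PySem.List.slice lines (some (-100)) none).map PySem.Str.strip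
  let last : Int := PySem.List.len window - 1
  pvGoB window (PySem.List.pyRange (last - 1) (-1) (-1)) last

-- ===== PRECONDITION & SPEC =====
def Spec_get_exception_stack_py (content : String) (out : List String) : Prop := out = get_exception_stack_py_alt content
instance (content : String) (out : List String) : Decidable (Spec_get_exception_stack_py content out) := by unfold Spec_get_exception_stack_py; infer_instance

-- ===== CLAIM (what is proved, stated in full; the proofs are below) =====
def Claim_equal_get_exception_stack_py : Prop := ∀ (content : String), Dom_get_exception_stack_py content → Spec_get_exception_stack_py content (get_exception_stack_py content)

-- ===== LEMMAS AND PROOFS =====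

-- the stripped tail window of length L (proof-side abbreviation)
def pvWS (lines : List String) (L : Nat) : List String :=
  (lines.drop (lines.length - L)).map PySem.Str.strip

theorem pvWS_length (lines : List String) (L : Nat) (h : L ≤ lines.length) :
    (pvWS lines L).length = L := by
  simp [pvWS]; omega

theorem pvWS_getElem (lines : List String) (L j : Nat) (hLn : L ≤ lines.length)
    (hj : j < L) :
    (pvWS lines L)[j]'(by rw [pvWS_length lines L hLn]; exact hj)
      = PySem.Str.strip (lines[lines.length - L + j]'(by omega)) := by
  simp [pvWS]

-- joint loop lemma: A's loop from index i and B's loop from L-i compute the same value,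
-- A's accumulator holding the stripped lines already visited (a reversed slice of the window)
theorem pvLoop (lines : List String) (L : Nat) (hLn : L ≤ lines.length) (m : Nat) :
    ∀ it : Nat, 2 ≤ it → it + m = L + 1 →
    pvGoA lines (PySem.List.pyRange (it : Int) ((L : Int) + 1) 1)
      ((((pvWS lines L).drop (L + 1 - it)).take (it - 2)).reverse)
    = pvGoB (pvWS lines L) (PySem.List.pyRange ((L : Int) - (it : Int)) (-1) (-1)) ((L : Int) - 1) := by
  induction m with
  | zero =>
    intro it h2 hm
    have hit : (it : Int) = (L : Int) + 1 := by omega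
    rw [hit, PySem.List.pyRange_one_eq_nil (le_refl _),
      show (L : Int) - ((L : Int) + 1) = -1 by ring,
      PySem.List.pyRange_neg_one_eq_nil (le_refl _)]
    simp [pvGoA, pvGoB]
  | succ m IH =>
    intro it h2 hm
    have hitL : it ≤ L := by omega
    have hwl : (pvWS lines L).length = L := pvWS_length lines L hLn
    rw [PySem.List.pyRange_one_cons (by omega : (it : Int) < (L : Int) + 1),
      PySem.List.pyRange_neg_one_cons (by omega : (-1 : Int) < (L : Int) - (it : Int))]
    -- A's indexing: lines[-it]
    have hget : PySem.List.pyGet? lines (-(it : Int)) = some (lines[lines.length - it]'(by omega)) := by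
      rw [PySem.List.pyGet?_neg_natCast lines it (by omega) (by omega)]
      exact List.getElem?_eq_getElem (by omega)
    -- B's indexing: window[L - it]
    have hgetD : PySem.List.pyGetD (pvWS lines L) ((L : Int) - (it : Int)) ""
        = PySem.Str.strip (lines[lines.length - it]'(by omega)) := by
      rw [PySem.List.pyGetD_eq_getElem (pvWS lines L) "" (by omega) (by rw [hwl]; omega)]
      have hj : ((L : Int) - (it : Int)).toNat = L - it := by omega
      simp only [hj]
      rw [pvWS_getElem lines L (L - it) hLn (by omega)]
      have hj2 : lines.length - L + (L - it) = lines.length - it := by omega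
      simp only [hj2]
    simp only [pvGoA, pvGoB, hget, hgetD]
    by_cases hc : PySem.Str.strip (lines[lines.length - it]'(by omega)) = pvMarker
    · rw [if_pos hc, if_pos hc]
      rw [PySem.List.slice_toNat _ (by omega) (by omega)]
      have h1 : ((L : Int) - (it : Int) + 1).toNat = L + 1 - it := by omega
      have h2' : ((L : Int) - 1).toNat - (L + 1 - it) = it - 2 := by omega
      simp only [h1, h2']
    · rw [if_neg hc, if_neg hc]
      have hlt : L - it < (pvWS lines L).length := by omega
      have hacc : (((pvWS lines L).drop (L + 1 - it)).take (it - 2)).reverse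
            ++ [PySem.Str.strip (lines[lines.length - it]'(by omega))]
          = (((pvWS lines L).drop (L + 1 - (it + 1))).take ((it + 1) - 2)).reverse := by
        rw [show L + 1 - (it + 1) = L - it by omega,
          List.drop_eq_getElem_cons hlt,
          show (it + 1) - 2 = (it - 2) + 1 by omega,
          List.take_succ_cons, List.reverse_cons,
          pvWS_getElem lines L (L - it) hLn (by omega)]
        have hj2 : lines.length - L + (L - it) = lines.length - it := by omega
        simp only [hj2]
        rw [show L - it + 1 = L + 1 - it from by omega]
      rw [hacc]
      have h := IH (it + 1) (by omega) (by omega)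
      push_cast at h
      rw [show (L : Int) - (it : Int) - 1 = (L : Int) - ((it : Int) + 1) by ring,
        show it + 1 - 2 = it - 1 from by omega,
        show L + 1 - (it + 1) = L - it from by omega]
      exact h

-- ===== VERDICT (by name: the statement is the Claim_ definition above) =====
theorem get_exception_stack_py_spec : Claim_equal_get_exception_stack_py := by
  intro content _
  unfold Spec_get_exception_stack_py
  simp only [get_exception_stack_py, get_exception_stack_py_alt]
  set lines := (PySem.Str.split? content "\n").getD [] with hlines
  set n := lines.length with hn
  set L := min n 100 with hLdef
  have hLn : L ≤ n := by omega
  have hmin : min (PySem.List.len lines) 100 = (L : Int) := by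
    simp [PySem.List.len_eq, hLdef]; omega
  have hwindow : (PySem.List.slice lines (some (-100)) none).map PySem.Str.strip
      = pvWS lines L := by
    rw [PySem.List.slice_from_neg_ofNat lines 100 (by norm_num), pvWS]
    congr 2
    omega
  rw [hmin, hwindow]
  have hwl : (pvWS lines L).length = L := pvWS_length lines L hLn
  have hlen : PySem.List.len (pvWS lines L) = (L : Int) := by
    simp [PySem.List.len_eq, hwl]
  rw [hlen]
  by_cases hL2 : 2 ≤ L
  · have := pvLoop lines L hLn (L - 1) 2 (le_refl _) (by omega)
    have hc2 : ((2 : Nat) : Int) = (2 : Int) := by norm_num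
    rw [hc2] at this
    have hacc : (((pvWS lines L).drop (L + 1 - 2)).take (2 - 2)).reverse = ([] : List String) := by
      simp
    rw [hacc] at this
    rw [show (L : Int) - 1 - 1 = (L : Int) - 2 by ring]
    exact this
  · rw [PySem.List.pyRange_one_eq_nil (by omega : (L : Int) + 1 ≤ 2),
      PySem.List.pyRange_neg_one_eq_nil (by omega : (L : Int) - 1 - 1 ≤ -1)]
    simp [pvGoA, pvGoB]
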